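-- pv_equiv track=rewrite | github.com/Python-Best-Coder/ConsoleOs | o.py | encrypt_number
-- ===== SOURCE A (Python) =====
-- def encrypt_number(number):
--     x = 0
--     toreturn = ''
--     while True:
--         if not x + 4 > number:
--             toreturn += '#'
--             x += 4
--         if not x + 3 > number:
--             toreturn += '*'
--             x += 3
--         elif not x + 2 > number:
--             toreturn += ':'
--             x += 2
--         elif not x + 1 > number:
--             toreturn += '.'
--             x += 1
--         else:
--             break
--
--     return toreturn
-- ===== SOURCE B (Python) =====
-- def encrypt_number(number):
--     if number <= 0:
--         return ''
--     q, r = divmod(number, 7)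
--     return '#*' * q + ('', '.', ':', '*', '#', '#.', '#:')[r]
-- ===== Notes on version B (the rewrite author's own statement) =====
-- stated objective: simpler
-- what changed: Replaced A's greedy character-by-character while-loop with a closed-form divmod(number,7) computation: '#*'*quotient plus a fixed 7-entry residue table.
import Mathlib
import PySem

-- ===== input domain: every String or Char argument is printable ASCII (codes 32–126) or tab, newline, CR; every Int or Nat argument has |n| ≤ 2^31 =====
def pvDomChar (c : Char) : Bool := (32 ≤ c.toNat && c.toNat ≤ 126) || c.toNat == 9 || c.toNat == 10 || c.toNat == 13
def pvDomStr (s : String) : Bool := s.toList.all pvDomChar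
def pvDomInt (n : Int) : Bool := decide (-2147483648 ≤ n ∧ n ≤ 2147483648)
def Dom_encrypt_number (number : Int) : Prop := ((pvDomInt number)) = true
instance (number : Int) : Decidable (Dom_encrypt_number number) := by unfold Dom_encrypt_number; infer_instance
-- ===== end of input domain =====

-- B replaces A's greedy character-by-character while-loop by a closed-form divmod-by-7
-- computation with a fixed residue table (objective: simpler).
-- Strings are modelled as their character lists (PySem.Chars convention) and wrapped with String.ofList.

-- ===== PORT A =====
-- the while-loop of A: state (x, toreturn); each branch appends the same character A appends
def encAloop (number x : Int) (acc : List Char) : List Char :=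
  if _h1 : x + 4 ≤ number then
    -- '#' taken, x becomes x + 4; the second if-chain sees the updated x
    if _h2 : x + 4 + 3 ≤ number then encAloop number (x + 4 + 3) (acc ++ ['#', '*'])
    else if _h3 : x + 4 + 2 ≤ number then encAloop number (x + 4 + 2) (acc ++ ['#', ':'])
    else if _h4 : x + 4 + 1 ≤ number then encAloop number (x + 4 + 1) (acc ++ ['#', '.'])
    else acc ++ ['#']
  else
    if _h5 : x + 3 ≤ number then encAloop number (x + 3) (acc ++ ['*'])
    else if _h6 : x + 2 ≤ number then encAloop number (x + 2) (acc ++ [':'])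
    else if _h7 : x + 1 ≤ number then encAloop number (x + 1) (acc ++ ['.'])
    else acc
termination_by (number - x).toNat
decreasing_by all_goals omega

def encrypt_number (number : Int) : String := String.ofList (encAloop number 0 [])

-- ===== PORT B =====
-- hand port of Python's '#*' * q (exact for the nonnegative count used here)
def repChars (cs : List Char) : Nat → List Char
  | 0 => []
  | n + 1 => cs ++ repChars cs n

def encrypt_number_alt (number : Int) : String :=
  if number ≤ 0 then "" else
    String.ofList (repChars ['#', '*'] (PySem.Int.floordiv number 7).toNat ++
      (PySem.List.pyGet? [[], ['.'], [':'], ['*'], ['#'], ['#', '.'], ['#', ':']]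
        (PySem.Int.mod number 7)).getD [])

-- ===== PRECONDITION & SPEC =====
def Spec_encrypt_number (number : Int) (out : String) : Prop := out = encrypt_number_alt number
instance (number : Int) (out : String) : Decidable (Spec_encrypt_number number out) := by unfold Spec_encrypt_number; infer_instance

-- ===== CLAIM (what is proved, stated in full; the proofs are below) =====
def Claim_equal_encrypt_number : Prop := ∀ (number : Int), Dom_encrypt_number number → Spec_encrypt_number number (encrypt_number number)

-- ===== LEMMAS AND PROOFS =====

-- the char-list value of B as a function of the remaining budget d
def gB (d : Int) : List Char :=
  if d ≤ 0 then [] else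
    repChars ['#', '*'] (PySem.Int.floordiv d 7).toNat ++
      (PySem.List.pyGet? [[], ['.'], [':'], ['*'], ['#'], ['#', '.'], ['#', ':']]
        (PySem.Int.mod d 7)).getD []

lemma gB_nonpos (d : Int) (h : d ≤ 0) : gB d = [] := by simp [gB, h]

lemma gB_sub7 (d : Int) (h : 7 ≤ d) : gB d = ['#', '*'] ++ gB (d - 7) := by
  have h7 : (0 : Int) < 7 := by norm_num
  have hq := PySem.Int.floordiv_eq_ediv_of_pos (a := d) h7
  have hq' := PySem.Int.floordiv_eq_ediv_of_pos (a := d - 7) h7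
  have hm := PySem.Int.mod_eq_emod_of_pos (a := d) h7
  have hm' := PySem.Int.mod_eq_emod_of_pos (a := d - 7) h7
  have hdq : d / 7 = (d - 7) / 7 + 1 := by omega
  have hdm : d % 7 = (d - 7) % 7 := by omega
  have hqn : (d / 7).toNat = ((d - 7) / 7).toNat + 1 := by omega
  by_cases h0 : d - 7 ≤ 0
  · have hd : d = 7 := by omega
    subst hd
    decide
  · simp only [gB, if_neg (by omega : ¬ d ≤ 0), if_neg h0, hq, hq', hm, hm', hqn, hdm,
      repChars, List.append_assoc]

lemma encAloop_eq (number x : Int) (acc : List Char) :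
    encAloop number x acc = acc ++ gB (number - x) := by
  induction x, acc using encAloop.induct number with
  | case1 x acc h1 h2 ih =>
    rw [encAloop]
    simp only [dif_pos h1, dif_pos h2, ih, List.append_assoc]
    have hd : number - (x + 4 + 3) = (number - x) - 7 := by ring
    rw [hd, ← gB_sub7 (number - x) (by omega)]
  | case2 x acc h1 h2 h3 ih =>
    rw [encAloop]
    simp only [dif_pos h1, dif_neg h2, dif_pos h3, ih, List.append_assoc]
    have hd : number - x = 6 := by omega
    have hd' : number - (x + 4 + 2) = 0 := by omega
    rw [hd, hd']
    exact congrArg (acc ++ ·) (by decide)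
  | case3 x acc h1 h2 h3 h4 ih =>
    rw [encAloop]
    simp only [dif_pos h1, dif_neg h2, dif_neg h3, dif_pos h4, ih, List.append_assoc]
    have hd : number - x = 5 := by omega
    have hd' : number - (x + 4 + 1) = 0 := by omega
    rw [hd, hd']
    exact congrArg (acc ++ ·) (by decide)
  | case4 x acc h1 h2 h3 h4 =>
    rw [encAloop]
    simp only [dif_pos h1, dif_neg h2, dif_neg h3, dif_neg h4]
    have hd : number - x = 4 := by omega
    rw [hd]
    exact congrArg (acc ++ ·) (by decide)
  | case5 x acc h1 h5 ih =>
    rw [encAloop]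
    simp only [dif_neg h1, dif_pos h5, ih, List.append_assoc]
    have hd : number - x = 3 := by omega
    have hd' : number - (x + 3) = 0 := by omega
    rw [hd, hd']
    exact congrArg (acc ++ ·) (by decide)
  | case6 x acc h1 h5 h6 ih =>
    rw [encAloop]
    simp only [dif_neg h1, dif_neg h5, dif_pos h6, ih, List.append_assoc]
    have hd : number - x = 2 := by omega
    have hd' : number - (x + 2) = 0 := by omega
    rw [hd, hd']
    exact congrArg (acc ++ ·) (by decide)
  | case7 x acc h1 h5 h6 h7 ih =>
    rw [encAloop]
    simp only [dif_neg h1, dif_neg h5, dif_neg h6, dif_pos h7, ih, List.append_assoc]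
    have hd : number - x = 1 := by omega
    have hd' : number - (x + 1) = 0 := by omega
    rw [hd, hd']
    exact congrArg (acc ++ ·) (by decide)
  | case8 x acc h1 h5 h6 h7 =>
    rw [encAloop]
    simp only [dif_neg h1, dif_neg h5, dif_neg h6, dif_neg h7]
    rw [gB_nonpos (number - x) (by omega), List.append_nil]

lemma alt_eq_gB (number : Int) : encrypt_number_alt number = String.ofList (gB number) := by
  unfold encrypt_number_alt gB
  split_ifs with h
  · rfl
  · rfl

-- ===== VERDICT (by name: the statement is the Claim_ definition above) =====
theorem encrypt_number_spec : Claim_equal_encrypt_number := by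
  intro number _
  unfold Spec_encrypt_number encrypt_number
  rw [encAloop_eq, alt_eq_gB]
  simp
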